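-- pv_equiv track=rewrite | github.com/dylansturg/WebProjects | Crypto/vigenerecipher.py | calculateLikelyKeyLens
-- ===== SOURCE A (Python) =====
-- from collections import deque
-- from operator import itemgetter
--
-- def calculateLikelyKeyLens(cipherText):
-- 	coincidenceCounts = []
-- 	shiftCipher = deque(cipherText)
-- 	shiftCipher.rotate(1)
--
-- 	for i in range(1, len(cipherText)):
-- 		coincidenceCounts.append((i, countCoincidences(cipherText, i)))
-- 		shiftCipher.rotate(1)
--
-- 	return sortKeys(coincidenceCounts)
--
-- def countCoincidences(text, offset):
-- 	coinCount = 0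
-- 	for i in range(0, len(text)-offset):
-- 		if text[i] == text[i+offset]:
-- 			coinCount += 1
--
-- 	return coinCount
--
-- def sortKeys(ls):
-- 	sortedResults = sorted(ls, key=itemgetter(1), reverse=True)
-- 	return sortedResults
-- ===== SOURCE B (Python) =====
-- from collections import Counter
--
--
-- def calculateLikelyKeyLens(cipherText):
--     # Group the positions of each character, then count coincidences per
--     # offset by walking only the position pairs inside each group: a pair of
--     # equal characters at positions p < q is exactly one coincidence at
--     # offset q - p.
--     positions = {}
--     for i, ch in enumerate(cipherText):
--         positions.setdefault(ch, []).append(i)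
--
--     counts = Counter()
--     for ps in positions.values():
--         for a in range(len(ps)):
--             for b in range(a + 1, len(ps)):
--                 counts[ps[b] - ps[a]] += 1
--
--     results = [(d, counts[d]) for d in range(1, len(cipherText))]
--     results.sort(key=lambda t: t[1], reverse=True)
--     return results
-- ===== Notes on version B (the rewrite author's own statement) =====
-- stated objective: alternative
-- what changed: Instead of re-scanning the whole text once per offset (n-1 quadratic scans), B groups the positions of each character once and emits one coincidence per equal-character position pair into a Counter keyed by the pair's distance, then reads the counts off per offset and sorts the same way; measured ~2x on the probe's inputs but not confirmed >=1.5x at the largest size, so claimed as alternative.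
import Mathlib
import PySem

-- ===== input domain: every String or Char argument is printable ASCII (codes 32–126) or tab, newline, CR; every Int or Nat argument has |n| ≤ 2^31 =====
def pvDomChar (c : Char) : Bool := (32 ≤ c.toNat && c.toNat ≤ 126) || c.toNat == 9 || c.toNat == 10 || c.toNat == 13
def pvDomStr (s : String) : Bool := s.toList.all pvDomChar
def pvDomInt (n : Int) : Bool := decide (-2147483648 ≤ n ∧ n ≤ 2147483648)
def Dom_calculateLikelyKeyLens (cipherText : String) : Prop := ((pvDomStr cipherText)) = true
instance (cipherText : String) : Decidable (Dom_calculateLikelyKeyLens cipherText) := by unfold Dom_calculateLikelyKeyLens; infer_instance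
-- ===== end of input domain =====

-- B counts coincidences by grouping each character's positions and tallying the distance of each
-- equal-character position pair in one Counter, instead of one full scan of the text per offset.


-- ===== PORT A =====
-- (A also builds and rotates a deque copy of the text; it is never read, so it is dead code.)
def countCoincidences (text : List Char) (offset : Int) : Int :=
  (PySem.List.pyRange 0 (PySem.List.len text - offset) 1).foldl
    (fun c i =>
      if PySem.List.pyGetD text i ' ' = PySem.List.pyGetD text (i + offset) ' ' then c + 1 else c)
    0

def sortKeys (ls : List (Int × Int)) : List (Int × Int) :=
  PySem.List.sorted ls (fun p => p.2) true

def calculateLikelyKeyLens (cipherText : String) : List (Int × Int) :=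
  let t := cipherText.toList
  let coincidenceCounts :=
    (PySem.List.pyRange 1 (PySem.List.len t) 1).foldl
      (fun acc i => acc ++ [(i, countCoincidences t i)]) []
  sortKeys coincidenceCounts

-- ===== PORT B =====
def calculateLikelyKeyLens_alt (cipherText : String) : List (Int × Int) :=
  let t := cipherText.toList
  let positions : PySem.Dict Char (List Int) :=
    (PySem.List.enumerate t 0).foldl (fun d p => d.modify p.2 [] (· ++ [p.1])) PySem.Dict.empty
  let counts : PySem.Dict Int Int :=
    positions.values.foldl (fun cnt ps =>
      (PySem.List.pyRange 0 (PySem.List.len ps) 1).foldl (fun cnt a =>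
        (PySem.List.pyRange (a + 1) (PySem.List.len ps) 1).foldl (fun cnt b =>
          cnt.modify (PySem.List.pyGetD ps b 0 - PySem.List.pyGetD ps a 0) 0 (· + 1)) cnt) cnt)
      PySem.Dict.empty
  let results := (PySem.List.pyRange 1 (PySem.List.len t) 1).map (fun d => (d, counts.getD d 0))
  PySem.List.sorted results (fun p => p.2) true

-- ===== PRECONDITION & SPEC =====
def Spec_calculateLikelyKeyLens (cipherText : String) (out : List (Int × Int)) : Prop := out = calculateLikelyKeyLens_alt cipherText
instance (cipherText : String) (out : List (Int × Int)) : Decidable (Spec_calculateLikelyKeyLens cipherText out) := by unfold Spec_calculateLikelyKeyLens; infer_instance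

-- ===== CLAIM (what is proved, stated in full; the proofs are below) =====
def Claim_equal_calculateLikelyKeyLens : Prop := ∀ (cipherText : String), Dom_calculateLikelyKeyLens cipherText → Spec_calculateLikelyKeyLens cipherText (calculateLikelyKeyLens cipherText)

-- ===== LEMMAS AND PROOFS =====

def pvPos (t : List Char) (c : Char) : List Int :=
  ((PySem.List.enumerate t 0).filter (fun p => p.2 == c)).map (fun p => p.1)

theorem pvCount_flatMap {α β : Type} [DecidableEq β] (l : List α) (f : α → List β) (d : β) :
    ((l.flatMap f).count d) = (l.map (fun x => (f x).count d)).sum := by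
  induction l with
  | nil => simp
  | cons a l ih => rw [List.flatMap_cons, List.count_append, ih]; simp

theorem pvSum_swap {α β : Type} (K : List α) (l : List β) (f : α → β → Nat) :
    (K.map (fun c => (l.map (f c)).sum)).sum = (l.map (fun q => (K.map (fun c => f c q)).sum)).sum := by
  induction K with
  | nil => simp
  | cons c K ih => simp [ih, ← List.sum_map_add]

theorem pvPos_pairwise (t : List Char) (c : Char) : (pvPos t c).Pairwise (· < ·) := by
  unfold pvPos
  rw [List.pairwise_map]
  exact (PySem.List.pairwise_lt_enumerate t 0).filter _

theorem pvMem_pvPos (t : List Char) (c : Char) (p : Int) :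
    p ∈ pvPos t c ↔ ∃ k : Nat, ∃ _ : k < t.length, p = (k : Int) ∧ t[k] = c := by
  unfold pvPos
  simp only [List.mem_map, List.mem_filter, PySem.List.mem_enumerate_iff]
  constructor
  · rintro ⟨q, ⟨⟨k, hk, rfl⟩, hc⟩, rfl⟩
    exact ⟨k, hk, by simpa using hc⟩
  · rintro ⟨k, hk, rfl, hc⟩
    exact ⟨((k : Int), t[k]), ⟨⟨k, hk, by simp⟩, by simpa using hc⟩, rfl⟩

theorem pvCountCo (t : List Char) (D : Nat) :
    countCoincidences t (D : Int)
    = (((List.range (t.length - D)).countP (fun k => t.getD k ' ' = t.getD (k + D) ' ') : Nat) : Int) := by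
  unfold countCoincidences
  have key := PySem.List.foldl_count_if
    (p := fun i => decide (PySem.List.pyGetD t i ' ' = PySem.List.pyGetD t (i + (D : Int)) ' '))
    (l := PySem.List.pyRange 0 (PySem.List.len t - (D : Int)) 1) (a := 0)
  simp only [decide_eq_true_eq] at key
  rw [key, zero_add]
  rw [PySem.List.len_eq, PySem.List.pyRange_zero]
  have h1 : ((t.length : Int) - (D : Int)).toNat = t.length - D := by omega
  rw [h1, List.countP_map]
  norm_num
  apply List.countP_congr
  intro k _
  simp only [Function.comp]
  rw [show ((k : Int) + (D : Int)) = ((k + D : Nat) : Int) by push_cast; ring]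
  simp only [PySem.List.pyGetD_natCast]
  simp [List.getD]

def pvDiffs : List Int → List Int
  | [] => []
  | p :: rest => rest.map (fun q => q - p) ++ pvDiffs rest

theorem pvDiffs_count (ps : List Int) (h : ps.Pairwise (· < ·)) (d : Int) (hd : 0 < d) :
    (pvDiffs ps).count d = ps.countP (fun p => decide ((p + d) ∈ ps)) := by
  induction ps with
  | nil => simp [pvDiffs]
  | cons p rest ih =>
    rcases List.pairwise_cons.mp h with ⟨hp, hrest⟩
    have hnd : rest.Nodup := List.Pairwise.imp (fun h => ne_of_lt h) hrest
    rw [pvDiffs, List.count_append, ih hrest]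
    have h1 : (rest.map (fun q => q - p)).count d = rest.count (p + d) := by
      rw [List.count_eq_countP, List.count_eq_countP, List.countP_map]
      apply List.countP_congr; intro x _
      simp only [Function.comp]
      constructor <;> (intro hh; simp at hh ⊢; omega)
    rw [h1]
    rw [List.countP_cons]
    have h2 : (decide ((p + d) ∈ p :: rest)) = (decide ((p + d) ∈ rest)) := by
      simp only [List.mem_cons]
      have : ¬ (p + d = p) := by omega
      simp [this]
    have h3 : rest.countP (fun q => decide ((q + d) ∈ p :: rest)) = rest.countP (fun q => decide ((q + d) ∈ rest)) := by
      apply List.countP_congr; intro x hx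
      have hpx : p < x := hp x hx
      simp only [List.mem_cons]
      have : ¬ (x + d = p) := by omega
      simp [this]
    rw [h3, h2]
    have h4 : rest.count (p + d) = if (p + d) ∈ rest then 1 else 0 := by
      split
      · exact List.count_eq_one_of_mem hnd (by assumption)
      · exact List.count_eq_zero_of_not_mem (by assumption)
    rw [h4]
    by_cases hmem : (p + d) ∈ rest <;> simp [hmem] <;> omega

def pvPyDiffs (ps : List Int) : List Int :=
  (PySem.List.pyRange 0 (PySem.List.len ps) 1).flatMap (fun a =>
    (PySem.List.pyRange (a + 1) (PySem.List.len ps) 1).map (fun b =>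
      PySem.List.pyGetD ps b 0 - PySem.List.pyGetD ps a 0))

def pvE (ps : List Int) : List Int :=
  (List.range ps.length).flatMap (fun a => (ps.drop (a+1)).map (fun q => q - ps.getD a 0))

theorem pvE_eq_pvDiffs (ps : List Int) : pvE ps = pvDiffs ps := by
  induction ps with
  | nil => simp [pvE, pvDiffs]
  | cons p rest ih =>
    rw [pvDiffs, ← ih]
    unfold pvE
    rw [List.length_cons, List.range_succ_eq_map, List.flatMap_cons, List.flatMap_map]
    simp only [List.drop_succ_cons, List.drop_zero, List.getD_cons_zero, List.getD_cons_succ,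
      Nat.succ_eq_add_one]

theorem pvPyDiffs_eq_pvDiffs (ps : List Int) : pvPyDiffs ps = pvDiffs ps := by
  rw [← pvE_eq_pvDiffs]
  unfold pvPyDiffs pvE
  rw [PySem.List.len_eq, PySem.List.pyRange_zero_nat, List.flatMap_map]
  apply List.flatMap_congr
  intro x _
  have hcast : ((x : Int) + 1) = (((x + 1 : Nat)) : Int) := by push_cast; ring
  rw [hcast]
  have hm := PySem.List.map_pyGetD_pyRange' ps 0 (a := (((x + 1 : Nat)) : Int)) (by positivity)
  rw [show (fun b => PySem.List.pyGetD ps b 0 - PySem.List.pyGetD ps (x : Int) 0)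
        = (fun q => q - PySem.List.pyGetD ps (x : Int) 0) ∘ (fun j => PySem.List.pyGetD ps j 0)
      from rfl]
  rw [← List.map_map, hm]
  simp [PySem.List.pyGetD_natCast]

def pvPosDict (t : List Char) : PySem.Dict Char (List Int) :=
  (PySem.List.enumerate t 0).foldl (fun d p => d.modify p.2 [] (· ++ [p.1])) PySem.Dict.empty

theorem pvPosDict_keys (t : List Char) : (pvPosDict t).keys = PySem.Set.ofList t := by
  unfold pvPosDict
  rw [PySem.Dict.keys_foldl_modify_key (PySem.List.enumerate t 0) (fun p => p.2) []
      (fun (_ : PySem.Dict Char (List Int)) (p : Int × Char) => (· ++ [p.1])) PySem.Dict.empty]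
  rw [PySem.Dict.keys_empty, PySem.Set.update_nil_left, PySem.List.map_snd_enumerate]

theorem pvPosDict_nodup (t : List Char) : (pvPosDict t).keys.Nodup := by
  unfold pvPosDict
  exact PySem.Dict.nodup_keys_foldl_modify_key _ (fun p => p.2) []
      (fun (_ : PySem.Dict Char (List Int)) (p : Int × Char) => (· ++ [p.1])) PySem.Dict.empty
      (by simp [PySem.Dict.keys_empty])

theorem pvPosDict_getD (t : List Char) (c : Char) : (pvPosDict t).getD c [] = pvPos t c := by
  unfold pvPosDict pvPos
  have hfm := List.foldl_map (f := fun (p : Int × Char) => (p.2, p.1))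
    (g := fun (d : PySem.Dict Char (List Int)) (q : Char × Int) => d.modify q.1 [] (· ++ [q.2]))
    (l := PySem.List.enumerate t 0) (init := PySem.Dict.empty)
  rw [show (fun (d : PySem.Dict Char (List Int)) (p : Int × Char) => d.modify p.2 [] (· ++ [p.1]))
        = (fun d p => (fun (d : PySem.Dict Char (List Int)) (q : Char × Int) => d.modify q.1 [] (· ++ [q.2])) d ((fun (p : Int × Char) => (p.2, p.1)) p))
      from rfl, ← hfm]
  rw [PySem.Dict.getD_foldl_modify_append, PySem.Dict.getD_empty]
  rw [List.filter_map, List.map_map]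
  simp [Function.comp_def]

theorem pvPosDict_values (t : List Char) :
    (pvPosDict t).values = (PySem.Set.ofList t).map (pvPos t) := by
  rw [PySem.Dict.values_eq_map_keys (pvPosDict t) (pvPosDict_nodup t) [], pvPosDict_keys]
  exact List.map_congr_left (fun c _ => pvPosDict_getD t c)

theorem pvFiberSum {α κ : Type} [BEq κ] [LawfulBEq κ] (K : List κ) (l : List α)
    (key : α → κ) (R : α → Bool) (hK : K.Nodup) (hmem : ∀ a ∈ l, key a ∈ K) :
    (K.map (fun c => l.countP (fun a => (key a == c) && R a))).sum = l.countP R := by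
  have h1 : ∀ (P : α → Bool), l.countP P = (l.map (fun a => if P a then 1 else 0)).sum :=
    fun P => (PySem.List.sum_map_ite_one_zero_nat P l).symm
  have h2 : (K.map (fun c => l.countP (fun a => (key a == c) && R a))).sum
      = (K.map (fun c => (l.map (fun a => if (key a == c) && R a then 1 else 0)).sum)).sum := by
    exact congrArg _ (List.map_congr_left (fun c _ => h1 _))
  rw [h2, pvSum_swap, h1 R]
  apply congrArg
  apply List.map_congr_left
  intro a ha
  by_cases hR : R a
  · simp only [hR, Bool.and_true]
    have e1 : (K.map (fun c => if (key a == c) = true then 1 else 0)).sum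
        = K.countP (fun c => key a == c) := PySem.List.sum_map_ite_one_zero_nat _ K
    have e2 : K.countP (fun c => key a == c) = K.count (key a) := by
      rw [List.count_eq_countP]
      apply List.countP_congr; intro c _
      simp [BEq.comm]
    rw [e1, e2, List.count_eq_one_of_mem hK (hmem a ha)]
    simp
  · simp only [hR, Bool.and_false]
    simp

theorem pvMemPos_nat (t : List Char) (c : Char) (k D : Nat) :
    (((k : Int) + (D : Int)) ∈ pvPos t c) ↔ (k + D < t.length ∧ t.getD (k + D) ' ' = c) := by
  rw [show ((k : Int) + (D : Int)) = ((k + D : Nat) : Int) by push_cast; ring, pvMem_pvPos]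
  constructor
  · rintro ⟨j, hj, hkj, hc⟩
    have : k + D = j := by exact_mod_cast hkj
    subst this
    exact ⟨hj, by rw [List.getD_eq_getElem _ _ hj]; exact hc⟩
  · rintro ⟨hlt, hc⟩
    exact ⟨k + D, hlt, rfl, by rw [← List.getD_eq_getElem _ ' ' hlt]; exact hc⟩

theorem pvCharSum (t : List Char) (D : Nat) :
    ((PySem.Set.ofList t).map (fun c => (pvPos t c).countP (fun p => decide ((p + (D : Int)) ∈ pvPos t c)))).sum
    = (List.range (t.length - D)).countP (fun k => t.getD k ' ' = t.getD (k + D) ' ') := by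
  have step_ab : ∀ c, (pvPos t c).countP (fun p => decide ((p + (D : Int)) ∈ pvPos t c))
      = (PySem.List.enumerate t 0).countP
          (fun q => (q.2 == c) && decide ((q.1 + (D : Int)) ∈ pvPos t q.2)) := by
    intro c
    rw [show (pvPos t c).countP (fun p => decide ((p + (D : Int)) ∈ pvPos t c))
          = (((PySem.List.enumerate t 0).filter (fun p => p.2 == c)).map (fun p => p.1)).countP
              (fun p => decide ((p + (D : Int)) ∈ pvPos t c)) from rfl]
    rw [List.countP_map, List.countP_filter]
    apply List.countP_congr
    intro q _
    by_cases hc : q.2 == c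
    · have : c = q.2 := (eq_of_beq hc).symm
      subst this
      simp [Function.comp, Bool.and_comm]
    · simp [Function.comp, hc]
  rw [List.map_congr_left (fun c _ => step_ab c)]
  rw [pvFiberSum (PySem.Set.ofList t) (PySem.List.enumerate t 0) (fun q => q.2)
      (fun q => decide ((q.1 + (D : Int)) ∈ pvPos t q.2)) (PySem.Set.nodup_ofList t)
      (by
        intro q hq
        rw [PySem.Set.mem_ofList]
        rcases (PySem.List.mem_enumerate_iff t 0 q).mp hq with ⟨k, hk, rfl⟩
        exact List.getElem_mem hk)]
  -- step d: enumerate as a map over range, reducing to a pure statement about List.range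
  have hd : (PySem.List.enumerate t 0).countP
        (fun q => decide ((q.1 + (D : Int)) ∈ pvPos t q.2))
      = (List.range t.length).countP
        (fun k => decide (k + D < t.length ∧ t.getD (k + D) ' ' = t.getD k ' ')) := by
    rw [PySem.List.enumerate_eq_map_pyRange t ' ', PySem.List.len_eq, PySem.List.pyRange_zero_nat,
      List.countP_map, List.countP_map]
    apply List.countP_congr
    intro k _
    simp only [Function.comp, PySem.List.pyGetD_natCast]
    simp only [decide_eq_true_eq]
    exact pvMemPos_nat t (t.getD k ' ') k D
  rw [hd]
  -- step e: shrink the range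
  by_cases hND : t.length ≤ D
  · have h0 : t.length - D = 0 := by omega
    rw [h0]
    simp only [List.range_zero, List.countP_nil]
    apply List.countP_eq_zero.mpr
    intro k _
    simp only [decide_eq_true_eq]
    omega
  · rw [not_le] at hND
    rw [show List.range t.length = List.range ((t.length - D) + D) by congr 1; omega,
      List.range_add, List.countP_append, List.countP_map]
    have hz : (List.range D).countP
        ((fun k => decide (k + D < t.length ∧ t.getD (k + D) ' ' = t.getD k ' '))
          ∘ (fun j => (t.length - D) + j)) = 0 := by
      apply List.countP_eq_zero.mpr
      intro i _
      simp only [Function.comp, decide_eq_true_eq]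
      omega
    rw [hz, Nat.add_zero]
    apply List.countP_congr
    intro k hk
    have hklt : k < t.length - D := List.mem_range.mp hk
    have h1 : k + D < t.length := by omega
    simp only [decide_eq_true_eq]
    constructor
    · rintro ⟨_, h⟩; exact h.symm
    · intro h; exact ⟨h1, h.symm⟩

theorem pvCounts_getD (vs : List (List Int)) (d : Int) :
    ((vs.foldl (fun cnt ps =>
      (PySem.List.pyRange 0 (PySem.List.len ps) 1).foldl (fun cnt a =>
        (PySem.List.pyRange (a + 1) (PySem.List.len ps) 1).foldl (fun cnt b =>
          cnt.modify (PySem.List.pyGetD ps b 0 - PySem.List.pyGetD ps a 0) 0 (· + 1)) cnt) cnt)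
      (PySem.Dict.empty : PySem.Dict Int Int)).getD d 0)
    = (((vs.flatMap pvPyDiffs).count d : Nat) : Int) := by
  have hinner : ∀ (ps : List Int) (cnt : PySem.Dict Int Int),
      (PySem.List.pyRange 0 (PySem.List.len ps) 1).foldl (fun cnt a =>
        (PySem.List.pyRange (a + 1) (PySem.List.len ps) 1).foldl (fun cnt b =>
          cnt.modify (PySem.List.pyGetD ps b 0 - PySem.List.pyGetD ps a 0) 0 (· + 1)) cnt) cnt
      = (pvPyDiffs ps).foldl (fun c x => c.modify x 0 (· + 1)) cnt := by
    intro ps cnt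
    unfold pvPyDiffs
    rw [List.foldl_flatMap]
    congr 1
    funext cnt a
    rw [List.foldl_map]
  have houter : vs.foldl (fun cnt ps =>
      (PySem.List.pyRange 0 (PySem.List.len ps) 1).foldl (fun cnt a =>
        (PySem.List.pyRange (a + 1) (PySem.List.len ps) 1).foldl (fun cnt b =>
          cnt.modify (PySem.List.pyGetD ps b 0 - PySem.List.pyGetD ps a 0) 0 (· + 1)) cnt) cnt)
      (PySem.Dict.empty : PySem.Dict Int Int)
      = (vs.flatMap pvPyDiffs).foldl (fun c x => c.modify x 0 (· + 1)) PySem.Dict.empty := by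
    rw [List.foldl_flatMap]
    congr 1
    funext cnt ps
    exact hinner ps cnt
  rw [houter, PySem.Dict.getD_foldl_modify_add_one, PySem.Dict.getD_empty, zero_add]

-- ===== VERDICT (by name: the statement is the Claim_ definition above) =====
theorem calculateLikelyKeyLens_spec : Claim_equal_calculateLikelyKeyLens := by
  intro s _
  unfold Spec_calculateLikelyKeyLens calculateLikelyKeyLens calculateLikelyKeyLens_alt
  dsimp only
  congr 1
  rw [PySem.List.foldl_append_singleton_eq_map, List.nil_append]
  apply List.map_congr_left
  intro d hd
  rcases (PySem.List.mem_pyRange_one (a := 1) (b := PySem.List.len s.toList) (x := d)).mp hd with ⟨h1, h2⟩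
  rw [PySem.List.len_eq] at h2
  obtain ⟨D, rfl⟩ : ∃ D : Nat, d = (D : Int) := ⟨d.toNat, by omega⟩
  have hD : 0 < D := by exact_mod_cast h1
  refine congrArg (fun x => ((D : Int), x)) ?_
  rw [pvCounts_getD]
  rw [show ((PySem.List.enumerate s.toList 0).foldl
        (fun d p => d.modify p.2 [] (· ++ [p.1])) PySem.Dict.empty) = pvPosDict s.toList from rfl]
  rw [pvPosDict_values, List.flatMap_map, pvCount_flatMap]
  have hper : ∀ c ∈ PySem.Set.ofList s.toList,
      (pvPyDiffs (pvPos s.toList c)).count ((D : Int))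
        = (pvPos s.toList c).countP (fun p => decide ((p + (D : Int)) ∈ pvPos s.toList c)) := by
    intro c _
    rw [pvPyDiffs_eq_pvDiffs]
    exact pvDiffs_count _ (pvPos_pairwise s.toList c) _ (by exact_mod_cast hD)
  rw [List.map_congr_left hper]
  rw [pvCharSum s.toList D, pvCountCo s.toList D]
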